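-- pv_equiv track=rewrite | github.com/emuehlegger/ecn100b | scripts/convert_pptx_to_qmd.py | _math_digit
-- ===== SOURCE A (Python) =====
-- def _math_digit(cp: int) -> str | None:
--     """Map a unicode code point to an ASCII digit if it's a math style variant."""
--     for base, start in (
--         (0x1D7CE, "0"),  # Math Bold
--         (0x1D7D8, "0"),  # Math Double-Struck
--         (0x1D7E2, "0"),  # Math Sans-Serif
--         (0x1D7EC, "0"),  # Math Sans-Serif Bold
--         (0x1D7F6, "0"),  # Math Monospace
--     ):
--         if base <= cp <= base + 9:
--             return chr(ord("0") + cp - base)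
--     # Superscript digits
--     superscripts = {0x00B2: "^{2}", 0x00B3: "^{3}", 0x00B9: "^{1}",
--                     0x2070: "^{0}", 0x2074: "^{4}", 0x2075: "^{5}",
--                     0x2076: "^{6}", 0x2077: "^{7}", 0x2078: "^{8}", 0x2079: "^{9}"}
--     if cp in superscripts:
--         return superscripts[cp]
--     return None
-- ===== SOURCE B (Python) =====
-- _SUPERSCRIPTS = {0x00B2: "^{2}", 0x00B3: "^{3}", 0x00B9: "^{1}",
--                  0x2070: "^{0}", 0x2074: "^{4}", 0x2075: "^{5}",
--                  0x2076: "^{6}", 0x2077: "^{7}", 0x2078: "^{8}", 0x2079: "^{9}"}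
--
--
-- def _build_table():
--     t = {}
--     for base in (0x1D7CE, 0x1D7D8, 0x1D7E2, 0x1D7EC, 0x1D7F6):
--         for d in range(10):
--             t[base + d] = str(d)
--     t.update(_SUPERSCRIPTS)
--     return t
--
--
-- _TABLE = _build_table()
--
--
-- def _math_digit(cp: int) -> str | None:
--     """Map a unicode code point to an ASCII digit if it's a math style variant."""
--     return _TABLE.get(cp)
-- ===== Notes on version B (the rewrite author's own statement) =====
-- stated objective: alternative
-- what changed: B precomputes a single module-level lookup table mapping every handled codepoint (five math-digit blocks generated by a build loop, merged with the superscripts) so _math_digit itself is one dict .get, replacing A's runtime five-range scan plus separate dict check.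
import Mathlib
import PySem

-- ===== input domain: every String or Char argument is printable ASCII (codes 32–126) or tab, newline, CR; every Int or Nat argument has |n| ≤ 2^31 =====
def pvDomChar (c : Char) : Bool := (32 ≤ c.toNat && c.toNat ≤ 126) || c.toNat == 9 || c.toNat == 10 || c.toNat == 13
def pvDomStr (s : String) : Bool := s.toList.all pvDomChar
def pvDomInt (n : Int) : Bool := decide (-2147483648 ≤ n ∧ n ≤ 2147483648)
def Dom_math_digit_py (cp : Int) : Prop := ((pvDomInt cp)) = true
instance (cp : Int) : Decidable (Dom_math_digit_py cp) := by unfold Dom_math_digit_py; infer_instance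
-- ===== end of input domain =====

-- B precomputes one lookup table (five math-digit blocks plus the superscripts) so the function itself is a single dict get (alternative data structure).

-- ===== PORT A =====
-- shared superscript literal (the same literal in both Pythons)
def mdSuperscripts : PySem.Dict Int String :=
  PySem.Dict.ofList [(0x00B2, "^{2}"), (0x00B3, "^{3}"), (0x00B9, "^{1}"),
                     (0x2070, "^{0}"), (0x2074, "^{4}"), (0x2075, "^{5}"),
                     (0x2076, "^{6}"), (0x2077, "^{7}"), (0x2078, "^{8}"), (0x2079, "^{9}")]

-- A's loop over the five (base, "0") pairs, tried in order
def mdLoopA (cp : Int) : List Int → Option String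
  | [] => none
  | b :: rest =>
      if b ≤ cp ∧ cp ≤ b + 9 then
        some (String.ofList [Char.ofNat (48 + cp - b).toNat])   -- chr(ord("0") + cp - base)
      else mdLoopA cp rest

def math_digit_py (cp : Int) : Option String :=
  match mdLoopA cp [0x1D7CE, 0x1D7D8, 0x1D7E2, 0x1D7EC, 0x1D7F6] with
  | some s => some s
  | none =>
      match mdSuperscripts.get? cp with
      | some v => some v
      | none => none

-- ===== PORT B =====
-- _build_table(): nested loop of inserts, then update with the superscripts
def mdTable : PySem.Dict Int String :=
  PySem.Dict.update
    (([0x1D7CE, 0x1D7D8, 0x1D7E2, 0x1D7EC, 0x1D7F6] : List Int).foldl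
      (fun t base =>
        (PySem.List.pyRange 0 10 1).foldl (fun t d => t.insert (base + d) (PySem.Int.toStr d)) t)
      PySem.Dict.empty)
    mdSuperscripts.items

def math_digit_py_alt (cp : Int) : Option String :=
  mdTable.get? cp

-- ===== PRECONDITION & SPEC =====
def Spec_math_digit_py (cp : Int) (out : Option String) : Prop := out = math_digit_py_alt cp
instance (cp : Int) (out : Option String) : Decidable (Spec_math_digit_py cp out) := by unfold Spec_math_digit_py; infer_instance

-- ===== CLAIM =====
def Claim_equal_math_digit_py : Prop := ∀ (cp : Int), Dom_math_digit_py cp → Spec_math_digit_py cp (math_digit_py cp)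

-- ===== LEMMAS AND PROOFS =====

-- the precomputed table, evaluated to its literal item list
set_option maxRecDepth 8192 in
set_option maxHeartbeats 1000000 in
theorem mdTable_eval :
    mdTable = PySem.Dict.mk
      ([(0x1D7CE, "0"), (0x1D7CF, "1"), (0x1D7D0, "2"), (0x1D7D1, "3"), (0x1D7D2, "4"),
       (0x1D7D3, "5"), (0x1D7D4, "6"), (0x1D7D5, "7"), (0x1D7D6, "8"), (0x1D7D7, "9"),
       (0x1D7D8, "0"), (0x1D7D9, "1"), (0x1D7DA, "2"), (0x1D7DB, "3"), (0x1D7DC, "4"),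
       (0x1D7DD, "5"), (0x1D7DE, "6"), (0x1D7DF, "7"), (0x1D7E0, "8"), (0x1D7E1, "9"),
       (0x1D7E2, "0"), (0x1D7E3, "1"), (0x1D7E4, "2"), (0x1D7E5, "3"), (0x1D7E6, "4"),
       (0x1D7E7, "5"), (0x1D7E8, "6"), (0x1D7E9, "7"), (0x1D7EA, "8"), (0x1D7EB, "9"),
       (0x1D7EC, "0"), (0x1D7ED, "1"), (0x1D7EE, "2"), (0x1D7EF, "3"), (0x1D7F0, "4"),
       (0x1D7F1, "5"), (0x1D7F2, "6"), (0x1D7F3, "7"), (0x1D7F4, "8"), (0x1D7F5, "9"),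
       (0x1D7F6, "0"), (0x1D7F7, "1"), (0x1D7F8, "2"), (0x1D7F9, "3"), (0x1D7FA, "4"),
       (0x1D7FB, "5"), (0x1D7FC, "6"), (0x1D7FD, "7"), (0x1D7FE, "8"), (0x1D7FF, "9")] ++
      [(0x00B2, "^{2}"), (0x00B3, "^{3}"), (0x00B9, "^{1}"),
       (0x2070, "^{0}"), (0x2074, "^{4}"), (0x2075, "^{5}"),
       (0x2076, "^{6}"), (0x2077, "^{7}"), (0x2078, "^{8}"), (0x2079, "^{9}")]) := by
  decide

-- A's loop finds nothing outside the contiguous block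
theorem md_loop_none (cp : Int) (h : ¬ (0x1D7CE ≤ cp ∧ cp ≤ 0x1D7FF)) :
    mdLoopA cp [0x1D7CE, 0x1D7D8, 0x1D7E2, 0x1D7EC, 0x1D7F6] = none := by
  simp only [mdLoopA]
  split_ifs <;> first | rfl | omega

-- lookup skips a prefix none of whose keys is cp (generic, by induction)
theorem md_get?_mk_append_skip (cp : Int) (l1 l2 : List (Int × String))
    (h : ∀ k ∈ l1.map Prod.fst, k ≠ cp) :
    (PySem.Dict.mk (l1 ++ l2)).get? cp = (PySem.Dict.mk l2).get? cp := by
  induction l1 with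
  | nil => rfl
  | cons p rest ih =>
      obtain ⟨k, v⟩ := p
      rw [List.cons_append, PySem.Dict.get?_mk_cons, if_neg]
      · exact ih (fun k' hk' => h k' (by simp [hk']))
      · simp only [beq_iff_eq]
        exact h k (by simp)

-- outside the block, the merged table looks up exactly as the superscript dict
theorem mdTable_get_out (cp : Int) (h : ¬ (0x1D7CE ≤ cp ∧ cp ≤ 0x1D7FF)) :
    mdTable.get? cp = mdSuperscripts.get? cp := by
  rw [mdTable_eval, md_get?_mk_append_skip]
  · rfl
  · intro k hk
    simp only [List.map_cons, List.map_nil, List.mem_cons, List.not_mem_nil, or_false] at hk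
    omega

-- ===== VERDICT =====
set_option maxRecDepth 8192 in
set_option maxHeartbeats 2000000 in
theorem math_digit_py_spec : Claim_equal_math_digit_py := by
  intro cp _
  unfold Spec_math_digit_py
  by_cases hr : 0x1D7CE ≤ cp ∧ cp ≤ 0x1D7FF
  · obtain ⟨h1, h2⟩ := hr; interval_cases cp <;> decide
  · by_cases hs : cp ∈ ([0x00B2, 0x00B3, 0x00B9, 0x2070, 0x2074, 0x2075, 0x2076, 0x2077, 0x2078, 0x2079] : List Int)
    · fin_cases hs <;> decide
    · unfold math_digit_py math_digit_py_alt
      rw [md_loop_none cp hr, mdTable_get_out cp hr]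
      cases mdSuperscripts.get? cp <;> rfl
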